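-- pv_equiv track=rewrite | github.com/vincent-lg/tsunami | src/primaires/scripting/fonctions/joindre.py | joindre
-- ===== SOURCE A (Python) =====
-- def joindre(liste, lien, dernier=""):
--     """Retourne une chaîne repre'sentant la liste jointe.
--
--     Les exemples plus bas sont assez explicites. L'idée est de convertir une liste de valeurs en une chaîne, souvent plus agréable à regarder.
--
--     Paramètres à préciser :
--
--       * liste : la liste à joindre ;
--       * lien : la valeur à mettre entre chaque élément de liste ;
--       * dernier (optionnel) : la valeur à mettre entre en dernier.
--
--     La liste peut contenir tout et n'importe quoi, mais il est
--     utile d'avoir une liste de chaînes, car on n'a pas de risques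
--     d'aléas d'affichage dans ce cas. Si par exemple vous voulez
--     afficher une liste de joueurs, regrouper le nom des joueurs
--     dans une liste que vous pourrez joindre ainsi. Ce n'est pas
--     une obligation, mais cela évite des confusions. Consultez
--     les exemples ci-dessous pour voir le fonctionnement de base
--     de cette fonction.
--
--     Exemples d'utilisation :
--
--       liste = liste("abricot", "poire", "pomme", "banane")
--       fruits = joindre(liste, " et ")
--       # " et " sera placé entre chaque élément de la liste :
--       # chaine contient donc :
--       # "abricot et poire et pomme et banane"
--       fruits = joindre(liste, ", ", " et ")
--       # Ici, on veut mettre ", " entre chaque élément, excepté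
--       # le dernier lien. chaine contient donc :
--       # "abricot, poire, pomme et banane"
--       # Ce qui est d'autant plus agréable.
--       participants = liste("Kredh", "Anael", "Eridan")
--       trier participants
--       participants = joindre(participants, " ")
--       # participants contient : "Anael Eridan Kredh"
--
--     """
--     if not liste:
--         return ""
--
--     dernier = dernier or lien
--     liste = [str(e) for e in liste]
--     chaine = lien.join(liste[:-1])
--     if len(liste) > 1:
--         chaine += dernier
--
--     chaine += liste[-1]
--     return chaine
-- ===== SOURCE B (Python) =====
-- def joindre(liste, lien, dernier=""):
--     elems = [str(e) for e in liste]
--     if not elems: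
--         return ""
--     sep = dernier or lien
--     n = len(elems)
--     res = elems[0]
--     for i in range(1, n):
--         res += (sep if i == n - 1 else lien) + elems[i]
--     return res
-- ===== Notes on version B (the rewrite author's own statement) =====
-- stated objective: alternative
-- what changed: B replaces A's slice-then-join-then-append-last decomposition (lien.join(liste[:-1]) + dernier + liste[-1]) by a single accumulating index loop that selects the separator per position (ordinary link, the special last link before the final element).
import Mathlib
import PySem

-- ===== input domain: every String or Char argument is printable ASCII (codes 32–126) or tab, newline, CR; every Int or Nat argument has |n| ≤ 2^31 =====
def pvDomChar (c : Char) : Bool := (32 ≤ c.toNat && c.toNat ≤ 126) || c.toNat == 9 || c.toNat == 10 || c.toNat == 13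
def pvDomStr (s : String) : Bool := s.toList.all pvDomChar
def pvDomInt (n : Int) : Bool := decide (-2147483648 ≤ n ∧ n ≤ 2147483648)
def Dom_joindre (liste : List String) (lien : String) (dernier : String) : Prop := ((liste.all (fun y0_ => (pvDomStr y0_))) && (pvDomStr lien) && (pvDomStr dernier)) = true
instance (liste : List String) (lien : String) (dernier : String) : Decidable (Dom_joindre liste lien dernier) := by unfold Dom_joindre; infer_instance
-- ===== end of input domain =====

-- B joins the list in one accumulating index loop choosing the separator per position
-- (ordinary link, special last link before the final element), instead of A's
-- join-of-prefix-slice plus appended last link; same return value, no speed claim.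

-- ===== PORT A =====
def joindre (liste : List String) (lien : String) (dernier : String) : String :=
  if liste = [] then ""
  else
    let dernier' := if dernier = "" then lien else dernier
    let liste' := liste.map (fun e => e)
    let chaine := PySem.Str.join lien (PySem.List.slice liste' none (some (-1)))
    let chaine := if 1 < liste'.length then chaine ++ dernier' else chaine
    chaine ++ ((PySem.List.pyGet? liste' (-1)).getD "")

-- ===== PORT B =====
def joindre_alt (liste : List String) (lien : String) (dernier : String) : String :=
  let elems := liste.map (fun e => e)
  if elems = [] then ""
  else
    let sep := if dernier = "" then lien else dernier
    let n : Int := elems.length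
    (PySem.List.pyRange 1 n 1).foldl
      (fun res i => res ++ (if i = n - 1 then sep else lien) ++ PySem.List.pyGetD elems i "")
      (PySem.List.pyGetD elems 0 "")

-- ===== PRECONDITION & SPEC =====
def Spec_joindre (liste : List String) (lien : String) (dernier : String) (out : String) : Prop := out = joindre_alt liste lien dernier
instance (liste : List String) (lien : String) (dernier : String) (out : String) : Decidable (Spec_joindre liste lien dernier out) := by unfold Spec_joindre; infer_instance

-- ===== CLAIM (what is proved, stated in full; the proofs are below) =====
def Claim_equal_joindre : Prop := ∀ (liste : List String) (lien : String) (dernier : String), Dom_joindre liste lien dernier → Spec_joindre liste lien dernier (joindre liste lien dernier)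

-- ===== LEMMAS AND PROOFS =====

-- join of a snocced nonempty list: the separator lands before the new last element
theorem join_concat (sep a b : String) (as : List String) :
    PySem.Str.join sep ((a :: as) ++ [b]) = PySem.Str.join sep (a :: as) ++ sep ++ b := by
  induction as generalizing a with
  | nil =>
    rw [← String.toList_inj]
    simp [PySem.Str.toList_join, PySem.Chars.join_cons_cons, PySem.Chars.join_singleton]
  | cons y t ih =>
    rw [← String.toList_inj]
    have h := congrArg String.toList (ih y)
    simp only [PySem.Str.toList_join, List.map_cons, List.map_append, List.map_nil,
      List.cons_append, String.toList_append] at h ⊢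
    rw [PySem.Chars.join_cons_cons, h]
    simp [PySem.Chars.join_cons_cons, List.append_assoc]

-- B's loop over the non-final indices 1..k builds the lien-joined prefix x :: ys.take k
theorem foldB_prefix (lien sep : String) (x z : String) (ys : List String) :
    ∀ k : Nat, k ≤ ys.length →
      (PySem.List.pyRange 1 ((k : Int) + 1) 1).foldl
        (fun res i => res ++ (if i = ((ys.length : Int) + 2) - 1 then sep else lien) ++
          PySem.List.pyGetD (x :: (ys ++ [z])) i "")
        x = PySem.Str.join lien (x :: ys.take k) := by
  intro k hk
  induction k with
  | zero =>
    rw [PySem.List.pyRange_one_eq_nil (by omega)]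
    rw [← String.toList_inj]
    simp [PySem.Str.toList_join, PySem.Chars.join_singleton]
  | succ k ih =>
    have hk' : k ≤ ys.length := by omega
    have hrange : PySem.List.pyRange 1 ((↑(k + 1) : Int) + 1) 1
        = PySem.List.pyRange 1 ((k : Int) + 1) 1 ++ [(k : Int) + 1] := by
      have := PySem.List.pyRange_one_succ_right (a := 1) (b := (k : Int) + 1) (by omega)
      push_cast
      push_cast at this
      exact this
    rw [hrange, List.foldl_append, ih hk']
    have hne : ¬ ((k : Int) + 1 = ((ys.length : Int) + 2) - 1) := by omega
    rw [List.foldl_cons, List.foldl_nil, if_neg hne]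
    have hget : PySem.List.pyGetD (x :: (ys ++ [z])) ((k : Int) + 1) ""
        = ys[k]'(by omega) := by
      have h1 : ((k : Int) + 1) = ((k + 1 : Nat) : Int) := by push_cast; ring
      rw [h1, PySem.List.pyGetD_natCast]
      have hlt : k + 1 < (x :: (ys ++ [z])).length := by simp; omega
      rw [List.getD_eq_getElem _ _ hlt]
      simp only [List.getElem_cons_succ]
      exact List.getElem_append_left (by omega)
    rw [hget]
    have htake : ys.take (k + 1) = ys.take k ++ [ys[k]'(by omega)] := by
      rw [List.take_add_one, List.getElem?_eq_getElem (by omega : k < ys.length)]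
      rfl
    rw [htake, ← List.cons_append, join_concat]

theorem joindre_eq_alt (liste : List String) (lien dernier : String) :
    joindre liste lien dernier = joindre_alt liste lien dernier := by
  cases liste with
  | nil => rfl
  | cons x rest =>
    rcases rest.eq_nil_or_concat with h | ⟨ys, z, h⟩
    · subst h
      rw [← String.toList_inj]
      simp [joindre, joindre_alt, PySem.List.slice_to_neg_one,
        PySem.List.pyGet?, PySem.List.pyIdx?,
        PySem.Str.toList_join, PySem.Chars.join_nil]
    · subst h
      rw [List.concat_eq_append]
      -- reduce B to the prefix-fold plus the final (special-separator) step
      rw [joindre_alt]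
      simp only [List.map_id_fun', id]
      rw [if_neg (List.cons_ne_nil _ _)]
      have hn : ((x :: (ys ++ [z])).length : Int) = (ys.length : Int) + 2 := by
        simp; omega
      rw [hn]
      have hsplit : PySem.List.pyRange 1 ((ys.length : Int) + 2) 1
          = PySem.List.pyRange 1 ((ys.length : Int) + 1) 1 ++ [(ys.length : Int) + 1] := by
        have := PySem.List.pyRange_one_succ_right (a := 1) (b := (ys.length : Int) + 1)
          (by omega)
        rw [show (ys.length : Int) + 2 = ((ys.length : Int) + 1) + 1 by ring, this]
      rw [hsplit, List.foldl_append]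
      have hget0 : PySem.List.pyGetD (x :: (ys ++ [z])) 0 "" = x := by
        rw [show (0 : Int) = ((0 : Nat) : Int) by rfl, PySem.List.pyGetD_natCast]; rfl
      rw [hget0]
      have hpre := foldB_prefix lien (if dernier = "" then lien else dernier) x z ys
        ys.length (le_refl _)
      push_cast at hpre
      rw [hpre]
      rw [List.foldl_cons, List.foldl_nil, if_pos (by omega)]
      have hgetlast : PySem.List.pyGetD (x :: (ys ++ [z])) ((ys.length : Int) + 1) "" = z := by
        rw [show ((ys.length : Int) + 1) = ((ys.length + 1 : Nat) : Int) by push_cast; ring,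
          PySem.List.pyGetD_natCast]
        have hlt : ys.length + 1 < (x :: (ys ++ [z])).length := by simp
        rw [List.getD_eq_getElem _ _ hlt]
        simp
      rw [hgetlast, List.take_length]
      -- reduce A to the same value
      rw [joindre]
      simp only [List.map_id_fun', id]
      rw [if_neg (List.cons_ne_nil _ _)]
      rw [if_pos (by simp only [List.length_cons, List.length_append]; omega :
        1 < (x :: (ys ++ [z])).length)]
      rw [PySem.List.slice_to_neg_one]
      rw [(by rw [show x :: (ys ++ [z]) = (x :: ys) ++ [z] by simp, List.dropLast_concat] :
        (x :: (ys ++ [z])).dropLast = x :: ys)]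
      have hgetA : (PySem.List.pyGet? (x :: (ys ++ [z])) (-1)).getD "" = z := by
        simp [PySem.List.pyGet?, PySem.List.pyIdx?]
      rw [hgetA]

-- ===== VERDICT (by name: the statement is the Claim_ definition above) =====
theorem joindre_spec : Claim_equal_joindre := by
  intro liste lien dernier _
  unfold Spec_joindre
  exact joindre_eq_alt liste lien dernier
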